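-- pv_equiv track=rewrite | github.com/chenye95/LeetCode_Progress | 1508_RangeSumSortedSubarraySum.py | range_sum_sorted_sum
-- ===== SOURCE A (Python) =====
-- import heapq
-- from typing import List
--
-- def range_sum_sorted_sum(nums: List[int], n: int, left: int, right: int) -> int:
--     """
--     :param nums: list of positive integer to compute sub array sum on
--     :param n: total number of integer in nums
--     :param left: sort sub array sum and return range sum between left and right
--     :param right: sort sub array sum and return range sum between left and right
--     """
--     min_heap_sub_array_sum = [(n_i, i) for i, n_i in enumerate(nums)]
--     heapq.heapify(min_heap_sub_array_sum)
--
--     range_sum = 0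
--     for k in range(1, right + 1):
--         sub_array_sum, i = heapq.heappop(min_heap_sub_array_sum)
--         if k >= left:
--             range_sum += sub_array_sum
--         if i < n - 1:
--             heapq.heappush(min_heap_sub_array_sum, (sub_array_sum + nums[i + 1], i + 1))
--
--     return range_sum % 1_000_000_007
-- ===== SOURCE B (Python) =====
-- def range_sum_sorted_sum(nums, n, left, right):
--     sums = []
--     for i in range(min(n, len(nums))):
--         acc = 0
--         for x in nums[i:n]:
--             acc += x
--             sums.append(acc)
--     return sum(v for k, v in enumerate(sorted(sums), 1) if left <= k <= right) % 1_000_000_007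
-- ===== Notes on version B (the rewrite author's own statement) =====
-- stated objective: simpler
-- what changed: Replaces the lazy heap enumeration of subarray sums (heapify + right pops, each pop pushing the extended subarray) by the direct method: materialise all n(n+1)/2 subarray sums with running accumulation, sort once, and sum the values whose 1-based rank k in the sorted list satisfies left <= k <= right.
-- outside the precondition, e.g. on range_sum_sorted_sum([2, -1], 2, 2, 2): A returns 2, B returns 1; on range_sum_sorted_sum([2, 1], 1, 1, 1): A returns 1, B returns 2; on range_sum_sorted_sum([1, 2], 0, 1, 1): A returns 1, B returns 0
import Mathlib
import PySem

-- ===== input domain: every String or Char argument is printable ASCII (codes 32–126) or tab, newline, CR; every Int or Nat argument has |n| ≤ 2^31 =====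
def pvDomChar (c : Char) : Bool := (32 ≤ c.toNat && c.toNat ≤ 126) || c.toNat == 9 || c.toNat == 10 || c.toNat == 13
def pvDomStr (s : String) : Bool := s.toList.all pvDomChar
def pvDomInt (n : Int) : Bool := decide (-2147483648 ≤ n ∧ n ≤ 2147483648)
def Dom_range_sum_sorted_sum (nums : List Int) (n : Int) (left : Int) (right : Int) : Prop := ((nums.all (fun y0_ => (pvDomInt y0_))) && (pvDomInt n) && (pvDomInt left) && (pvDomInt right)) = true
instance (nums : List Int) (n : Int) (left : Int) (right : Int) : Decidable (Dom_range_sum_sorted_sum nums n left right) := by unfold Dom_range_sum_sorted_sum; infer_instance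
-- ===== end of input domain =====

-- B replaces A's lazy heap enumeration of subarray sums by materialise-all + one sort + a rank-filtered sum
-- (objective: simpler).  Equivalence is about the RETURN value; neither version mutates its arguments.

-- ===== PORT A =====
-- Python tuple comparison (sum, index) < (sum', index'): lexicographic.
def pvPairLt (a b : Int × Int) : Bool := a.1 < b.1 || (a.1 == b.1 && a.2 < b.2)

-- heapq contract port: a heap is its multiset of entries; heappop returns the least tuple
-- and removes one occurrence of it.  (heapq.heapify/heappush/heappop are library calls in A;
-- they are ported by their exact contract on the heap's contents.)
def pvHeapMin (x : Int × Int) (xs : List (Int × Int)) : Int × Int :=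
  xs.foldl (fun m y => if pvPairLt y m then y else m) x

def pvPopMin : List (Int × Int) → Option ((Int × Int) × List (Int × Int))
  | [] => none
  | x :: xs =>
    let m := pvHeapMin x xs
    some (m, (x :: xs).erase m)

-- one iteration of A's 'for k in range(1, right + 1)' loop body
def pvAStep (nums : List Int) (n : Int) (left : Int)
    (st : List (Int × Int) × Int) (k : Int) : List (Int × Int) × Int :=
  match pvPopMin st.1 with
  | none => st          -- Python raises IndexError on an empty heap; Pre_ excludes these inputs
  | some ((s, i), h) =>
      ((if i < n - 1 then h ++ [(s + PySem.List.pyGetD nums (i + 1) 0, i + 1)] else h),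
       (if left ≤ k then st.2 + s else st.2))
      -- nums[i+1] is PySem.List.pyGetD: under Pre_ (n = len nums) the index is in range

def range_sum_sorted_sum (nums : List Int) (n : Int) (left : Int) (right : Int) : Int :=
  let heap0 : List (Int × Int) := nums.zipIdx.map (fun p => (p.1, (p.2 : Int)))
  let r := (PySem.List.pyRange 1 (right + 1)).foldl (pvAStep nums n left) (heap0, 0)
  PySem.Int.mod r.2 1000000007

-- ===== PORT B =====
def range_sum_sorted_sum_alt (nums : List Int) (n : Int) (left : Int) (right : Int) : Int :=
  let sums : List Int :=
    (PySem.List.pyRange 0 (min n (nums.length : Int))).foldl (fun sums i =>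
      ((PySem.List.slice nums (some i) (some n)).foldl
        (fun (st : Int × List Int) x =>
          let acc := st.1 + x
          (acc, st.2 ++ [acc]))
        (0, sums)).2) []
  let sortedSums := PySem.List.sorted sums (fun x => x)
  PySem.Int.mod
    ((PySem.List.enumerate sortedSums 1).foldl
      (fun acc p => if left ≤ p.1 ∧ p.1 ≤ right then acc + p.2 else acc) 0)
    1000000007

-- ===== PRECONDITION & SPEC =====
-- Pre_ restricts to calls on which A's value is the function's specified value: either the
-- documented domain — n is the length of nums (A indexes nums by it and its heap holds one
-- single per actual element), non-negative elements (the docstring demands positive integers;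
-- A's lazy heap only enumerates subarray sums in sorted order when extending a subarray cannot
-- decrease its sum) and right ≤ n(n+1)/2 (beyond that A raises IndexError on the exhausted
-- heap) — or the degenerate rank ranges right ≤ 0 / right < left, on which A's loop adds
-- nothing and returns 0: for right ≤ 0 the loop body never runs at all, and for right < left
-- we also require n ≤ len(nums) and right at most the number of pops A's heap can supply, so
-- that A completes its pops without an IndexError.
def Pre_range_sum_sorted_sum (nums : List Int) (n : Int) (left : Int) (right : Int) : Prop :=
  right ≤ 0 ∨
    (n ≤ (nums.length : Int) ∧
      ((n = (nums.length : Int) ∧ (∀ x ∈ nums, 0 ≤ x) ∧ 2 * right ≤ n * (n + 1)) ∨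
       (right < left ∧
         (if 0 ≤ n then 2 * right ≤ n * (n + 1) + 2 * ((nums.length : Int) - n)
          else right ≤ (nums.length : Int)))))
instance (nums : List Int) (n : Int) (left : Int) (right : Int) : Decidable (Pre_range_sum_sorted_sum nums n left right) := by unfold Pre_range_sum_sorted_sum; infer_instance

def pvWitness_range_sum_sorted_sum : List Int × Int × Int × Int := ([1, 2, 3], 3, 2, 4)

def Spec_range_sum_sorted_sum (nums : List Int) (n : Int) (left : Int) (right : Int) (out : Int) : Prop := out = range_sum_sorted_sum_alt nums n left right
instance (nums : List Int) (n : Int) (left : Int) (right : Int) (out : Int) : Decidable (Spec_range_sum_sorted_sum nums n left right out) := by unfold Spec_range_sum_sorted_sum; infer_instance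

-- ===== CLAIM (what is proved, stated in full; the proofs are below) =====
def Claim_equal_range_sum_sorted_sum : Prop := ∀ (nums : List Int) (n : Int) (left : Int) (right : Int), Dom_range_sum_sorted_sum nums n left right → Pre_range_sum_sorted_sum nums n left right → Spec_range_sum_sorted_sum nums n left right (range_sum_sorted_sum nums n left right)

-- ===== LEMMAS AND PROOFS =====

-- the (lazy) chain of subarray extensions generated from heap entry (s, i)
def pvChain (nums : List Int) (n : Int) (s : Int) (i : Int) : List (Int × Int) :=
  (s, i) ::
    (if _h : i < n - 1 then pvChain nums n (s + PySem.List.pyGetD nums (i + 1) 0) (i + 1) else [])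
termination_by (n - i).toNat
decreasing_by omega

def pvChainF (nums : List Int) (n : Int) (p : Int × Int) : List (Int × Int) :=
  pvChain nums n p.1 p.2

-- t steps of the popping process: (heap after t pops, the t popped entries in order)
def pvIter (nums : List Int) (n : Int) (h0 : List (Int × Int)) :
    Nat → List (Int × Int) × List (Int × Int)
  | 0 => (h0, [])
  | t + 1 =>
    let st := pvIter nums n h0 t
    match pvPopMin st.1 with
    | none => st
    | some ((s, i), h) =>
        ((if i < n - 1 then h ++ [(s + PySem.List.pyGetD nums (i + 1) 0, i + 1)] else h),
         st.2 ++ [(s, i)])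

theorem pvHeapMin_spec (x : Int × Int) (xs : List (Int × Int)) :
    pvHeapMin x xs ∈ x :: xs ∧ ∀ y ∈ x :: xs, (pvHeapMin x xs).1 ≤ y.1 := by
  induction xs generalizing x with
  | nil => simp [pvHeapMin]
  | cons y ys ih =>
    have key : pvHeapMin x (y :: ys) = pvHeapMin (if pvPairLt y x then y else x) ys := rfl
    obtain ⟨hmem, hle⟩ := ih (if pvPairLt y x then y else x)
    have hite1 : (if pvPairLt y x then y else x).1 ≤ x.1 ∧ (if pvPairLt y x then y else x).1 ≤ y.1 := by
      split_ifs with h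
      · simp only [pvPairLt, Bool.or_eq_true, decide_eq_true_eq, Bool.and_eq_true,
          beq_iff_eq] at h
        rcases h with h | ⟨h1, _⟩ <;> constructor <;> omega
      · simp only [pvPairLt, Bool.or_eq_true, decide_eq_true_eq, Bool.and_eq_true,
          beq_iff_eq, not_or] at h
        exact ⟨le_refl _, by omega⟩
    constructor
    · rw [key]
      rcases List.mem_cons.mp hmem with h | h
      · rw [h]; split_ifs <;> simp
      · simp [h]
    · intro z hz
      rw [key]
      have hmle := hle _ (List.mem_cons_self)
      simp only [List.mem_cons] at hz
      rcases hz with rfl | rfl | hz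
      · exact le_trans hmle hite1.1
      · exact le_trans hmle hite1.2
      · exact hle _ (List.mem_cons_of_mem _ hz)

theorem pvPopMin_eq_none {h : List (Int × Int)} (hc : pvPopMin h = none) : h = [] := by
  cases h with
  | nil => rfl
  | cons x xs => simp [pvPopMin] at hc

theorem pvPopMin_spec {h : List (Int × Int)} {m : Int × Int} {h' : List (Int × Int)}
    (hc : pvPopMin h = some (m, h')) :
    m ∈ h ∧ h.Perm (m :: h') ∧ ∀ y ∈ h, m.1 ≤ y.1 := by
  cases h with
  | nil => simp [pvPopMin] at hc
  | cons x xs =>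
    simp only [pvPopMin, Option.some.injEq, Prod.mk.injEq] at hc
    obtain ⟨hm, hh'⟩ := hc
    obtain ⟨hmem, hle⟩ := pvHeapMin_spec x xs
    subst hm hh'
    exact ⟨hmem, List.perm_cons_erase hmem, hle⟩
-- the process invariant
def pvInv (nums : List Int) (n : Int) (h0 : List (Int × Int)) (t : Nat) : Prop :=
  let st := pvIter nums n h0 t
  (∀ p ∈ st.1, 0 ≤ p.2 ∧ p.2 < n) ∧
  (st.2 ++ st.1.flatMap (pvChainF nums n)).Perm (h0.flatMap (pvChainF nums n)) ∧
  (st.2.map Prod.fst).Pairwise (· ≤ ·) ∧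
  (∀ a ∈ st.2, ∀ b ∈ st.1, a.1 ≤ b.1) ∧
  st.2.length ≤ t ∧ (st.1 = [] ∨ st.2.length = t)

theorem pvChain_cons (nums : List Int) (n s i : Int) :
    pvChain nums n s i = (s, i) ::
      (if i < n - 1 then pvChain nums n (s + PySem.List.pyGetD nums (i + 1) 0) (i + 1) else []) := by
  rw [pvChain]
  simp

theorem pvIter_succ_none {nums : List Int} {n : Int} {h0 : List (Int × Int)} {t : Nat}
    (hc : pvPopMin (pvIter nums n h0 t).1 = none) :
    pvIter nums n h0 (t + 1) = pvIter nums n h0 t := by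
  simp [pvIter, hc]

theorem pvIter_succ_some {nums : List Int} {n : Int} {h0 : List (Int × Int)} {t : Nat}
    {s i : Int} {h : List (Int × Int)}
    (hc : pvPopMin (pvIter nums n h0 t).1 = some ((s, i), h)) :
    pvIter nums n h0 (t + 1) =
      ((if i < n - 1 then h ++ [(s + PySem.List.pyGetD nums (i + 1) 0, i + 1)] else h),
       (pvIter nums n h0 t).2 ++ [(s, i)]) := by
  simp [pvIter, hc]

theorem pvInv_holds (nums : List Int) (n : Int) (h0 : List (Int × Int))
    (hn : n = (nums.length : Int)) (hpos : ∀ x ∈ nums, 0 ≤ x)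
    (hwf : ∀ p ∈ h0, 0 ≤ p.2 ∧ p.2 < n) (t : Nat) : pvInv nums n h0 t := by
  induction t with
  | zero => exact ⟨hwf, by simp [pvIter], by simp [pvIter], by simp [pvIter],
      by simp [pvIter], Or.inr (by simp [pvIter])⟩
  | succ t ih =>
    obtain ⟨IH1, IH2, IH3, IH4, IH5, IH6⟩ := ih
    cases hc : pvPopMin (pvIter nums n h0 t).1 with
    | none =>
      have hnil := pvPopMin_eq_none hc
      rw [pvInv, pvIter_succ_none hc]
      exact ⟨IH1, IH2, IH3, IH4, Nat.le_succ_of_le IH5, Or.inl hnil⟩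
    | some p =>
      obtain ⟨⟨s, i⟩, h'⟩ := p
      obtain ⟨hmem, hperm, hmin⟩ := pvPopMin_spec hc
      have hI := IH1 _ hmem
      have hne : (pvIter nums n h0 t).1 ≠ [] := by
        intro hnil; rw [hnil] at hc; simp [pvPopMin] at hc
      have hsub : ∀ b ∈ h', b ∈ (pvIter nums n h0 t).1 :=
        fun b hb => hperm.mem_iff.mpr (List.mem_cons_of_mem _ hb)
      have hchild_ge : i < n - 1 → s ≤ s + PySem.List.pyGetD nums (i + 1) 0 := by
        intro hlt
        have h01 : (0 : Int) ≤ i + 1 := by omega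
        have h1n : i + 1 < (nums.length : Int) := by omega
        rw [PySem.List.pyGetD_eq_getElem nums 0 h01 h1n]
        have := hpos _ (List.getElem_mem (l := nums) (n := (i + 1).toNat)
          (by omega))
        omega
      have hmemheap : ∀ b ∈ (if i < n - 1 then
            h' ++ [(s + PySem.List.pyGetD nums (i + 1) 0, i + 1)] else h'),
          b ∈ (pvIter nums n h0 t).1 ∨
            (i < n - 1 ∧ b = (s + PySem.List.pyGetD nums (i + 1) 0, i + 1)) := by
        intro b hb
        split_ifs at hb with hlt
        · rcases List.mem_append.mp hb with hb | hb
          · exact Or.inl (hsub _ hb)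
          · exact Or.inr ⟨hlt, List.mem_singleton.mp hb⟩
        · exact Or.inl (hsub _ hb)
      rw [pvInv, pvIter_succ_some hc]
      refine ⟨?_, ?_, ?_, ?_, ?_, ?_⟩
      · -- WF
        intro p hp
        rcases hmemheap p hp with hp | ⟨hlt, rfl⟩
        · exact IH1 _ hp
        · exact ⟨by omega, by omega⟩
      · -- conservation permutation
        have hflat : ((pvIter nums n h0 t).1.flatMap (pvChainF nums n)).Perm
            (((s, i) :: h').flatMap (pvChainF nums n)) :=
          List.Perm.flatMap hperm (fun a _ => List.Perm.refl _)
        have hCm : pvChainF nums n (s, i) = (s, i) ::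
            (if i < n - 1 then
              pvChainF nums n (s + PySem.List.pyGetD nums (i + 1) 0, i + 1) else []) := by
          unfold pvChainF
          exact pvChain_cons nums n s i
        have step1 : (((pvIter nums n h0 t).2 ++ [(s, i)]) ++
            (if i < n - 1 then
              h' ++ [(s + PySem.List.pyGetD nums (i + 1) 0, i + 1)] else h').flatMap
              (pvChainF nums n)).Perm
            ((pvIter nums n h0 t).2 ++
              (((s, i) :: h').flatMap (pvChainF nums n))) := by
          rw [List.flatMap_cons, hCm]
          split_ifs with hlt
          · simp only [List.flatMap_append, List.flatMap_cons, List.flatMap_nil,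
              List.append_nil, List.append_assoc, List.cons_append]
            refine List.Perm.append_left _ (List.Perm.cons _ ?_)
            simp only [List.nil_append]
            exact List.perm_append_comm
          · simp [List.append_assoc]
        refine step1.trans (((List.Perm.append_left _ hflat.symm)).trans IH2)
      · -- emitted values are nondecreasing
        rw [List.map_append, List.pairwise_append]
        refine ⟨IH3, by simp, ?_⟩
        intro a ha b hb
        simp only [List.map_cons, List.map_nil, List.mem_singleton] at hb
        subst hb
        obtain ⟨p, hp, rfl⟩ := List.mem_map.mp ha
        exact IH4 _ hp _ hmem
      · -- emitted ≤ heap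
        intro a ha b hb
        rcases List.mem_append.mp ha with ha | ha
        · rcases hmemheap b hb with hbh | ⟨hlt, rfl⟩
          · exact IH4 _ ha _ hbh
          · exact le_trans (IH4 _ ha _ hmem) (hchild_ge hlt)
        · rw [List.mem_singleton.mp ha]
          rcases hmemheap b hb with hbh | ⟨hlt, rfl⟩
          · exact hmin _ hbh
          · exact hchild_ge hlt
      · simp only [List.length_append, List.length_cons, List.length_nil]
        omega
      · right
        rcases IH6 with hnil | hlen
        · exact absurd hnil hne
        · simp [hlen]

theorem pvFlat_len_pos (nums : List Int) (n : Int) {h : List (Int × Int)} (hne : h ≠ []) :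
    0 < (h.flatMap (pvChainF nums n)).length := by
  cases h with
  | nil => exact absurd rfl hne
  | cons x xs =>
    rw [List.flatMap_cons]
    unfold pvChainF
    rw [pvChain_cons]
    simp

theorem pvNE (nums : List Int) (n : Int) (h0 : List (Int × Int))
    (hn : n = (nums.length : Int)) (hpos : ∀ x ∈ nums, 0 ≤ x)
    (hwf : ∀ p ∈ h0, 0 ≤ p.2 ∧ p.2 < n) (t : Nat)
    (ht : t < (h0.flatMap (pvChainF nums n)).length) : (pvIter nums n h0 t).1 ≠ [] := by
  obtain ⟨_, IH2, _, _, IH5, _⟩ := pvInv_holds nums n h0 hn hpos hwf t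
  intro hnil
  rw [hnil] at IH2
  have hlen : (pvIter nums n h0 t).2.length = (h0.flatMap (pvChainF nums n)).length := by
    simpa using IH2.length_eq
  omega

theorem pvLen (nums : List Int) (n : Int) (h0 : List (Int × Int)) (t : Nat)
    (hne : ∀ u < t, (pvIter nums n h0 u).1 ≠ []) : (pvIter nums n h0 t).2.length = t := by
  induction t with
  | zero => simp [pvIter]
  | succ t ih =>
    have hnet := hne t (by omega)
    cases hc : pvPopMin (pvIter nums n h0 t).1 with
    | none => exact absurd (pvPopMin_eq_none hc) hnet
    | some p =>
      obtain ⟨⟨s, i⟩, h'⟩ := p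
      rw [pvIter_succ_some hc]
      simp only [List.length_append, List.length_cons, List.length_nil]
      rw [ih (fun u hu => hne u (by omega))]

theorem pvHeapEmptyTotal (nums : List Int) (n : Int) (h0 : List (Int × Int))
    (hn : n = (nums.length : Int)) (hpos : ∀ x ∈ nums, 0 ≤ x)
    (hwf : ∀ p ∈ h0, 0 ≤ p.2 ∧ p.2 < n) :
    (pvIter nums n h0 (h0.flatMap (pvChainF nums n)).length).1 = [] := by
  obtain ⟨_, IH2, _, _, IH5, IH6⟩ :=
    pvInv_holds nums n h0 hn hpos hwf (h0.flatMap (pvChainF nums n)).length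
  rcases IH6 with hnil | hlen
  · exact hnil
  · by_contra hne
    have hpos' := pvFlat_len_pos nums n hne
    have := IH2.length_eq
    simp only [List.length_append] at this
    omega

theorem pvFullPerm (nums : List Int) (n : Int) (h0 : List (Int × Int))
    (hn : n = (nums.length : Int)) (hpos : ∀ x ∈ nums, 0 ≤ x)
    (hwf : ∀ p ∈ h0, 0 ≤ p.2 ∧ p.2 < n) :
    (pvIter nums n h0 (h0.flatMap (pvChainF nums n)).length).2.Perm
      (h0.flatMap (pvChainF nums n)) := by
  obtain ⟨_, IH2, _, _, _, _⟩ :=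
    pvInv_holds nums n h0 hn hpos hwf (h0.flatMap (pvChainF nums n)).length
  rw [pvHeapEmptyTotal nums n h0 hn hpos hwf] at IH2
  simpa using IH2

theorem pvPrefix (nums : List Int) (n : Int) (h0 : List (Int × Int)) {t u : Nat}
    (htu : t ≤ u) : (pvIter nums n h0 t).2 <+: (pvIter nums n h0 u).2 := by
  induction u, htu using Nat.le_induction with
  | base => exact List.prefix_refl _
  | succ u _ ih =>
    refine ih.trans ?_
    cases hc : pvPopMin (pvIter nums n h0 u).1 with
    | none => rw [pvIter_succ_none hc]
    | some p =>
      obtain ⟨⟨s, i⟩, h'⟩ := p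
      rw [pvIter_succ_some hc]
      exact List.prefix_append _ _

theorem pvTake (nums : List Int) (n : Int) (h0 : List (Int × Int)) {t u : Nat}
    (htu : t ≤ u) (hne : ∀ v < t, (pvIter nums n h0 v).1 ≠ []) :
    (pvIter nums n h0 t).2 = (pvIter nums n h0 u).2.take t := by
  obtain ⟨r, hr⟩ := pvPrefix nums n h0 htu
  have hlen := pvLen nums n h0 t hne
  rw [← hr]
  exact (List.take_left' hlen).symm


theorem pvFoldIter (nums : List Int) (n : Int) (h0 : List (Int × Int)) (left : Int)
    (t : Nat) (hne : ∀ u < t, (pvIter nums n h0 u).1 ≠ []) :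
    (PySem.List.pyRange 1 ((t : Int) + 1)).foldl (pvAStep nums n left) (h0, 0) =
      ((pvIter nums n h0 t).1,
       (((pvIter nums n h0 t).2.map Prod.fst).drop (left - 1).toNat).sum) := by
  induction t with
  | zero =>
    have h0r : PySem.List.pyRange 1 (((0 : Nat) : Int) + 1) = [] := by
      rw [PySem.List.pyRange_one]
      simp
    rw [h0r]
    simp [pvIter]
  | succ t ih =>
    have hcast : (((t + 1 : Nat) : Int) + 1) = ((t : Int) + 1) + 1 := by push_cast; ring
    rw [hcast, PySem.List.pyRange_one_succ_right (by omega), List.foldl_append,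
      ih (fun u hu => hne u (by omega))]
    have hnet := hne t (by omega)
    cases hc : pvPopMin (pvIter nums n h0 t).1 with
    | none => exact absurd (pvPopMin_eq_none hc) hnet
    | some p =>
      obtain ⟨⟨s, i⟩, h'⟩ := p
      rw [pvIter_succ_some hc]
      simp only [List.foldl_cons, List.foldl_nil, pvAStep, hc]
      refine Prod.ext rfl ?_
      have hlen : ((pvIter nums n h0 t).2.map Prod.fst).length = t := by
        rw [List.length_map, pvLen nums n h0 t (fun u hu => hne u (by omega))]
      simp only [List.map_append, List.map_cons, List.map_nil]
      rw [List.drop_append, List.sum_append, hlen]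
      by_cases hcase : left ≤ (t : Int) + 1
      · rw [if_pos hcase]
        have hd0 : (left - 1).toNat - t = 0 := by omega
        rw [hd0]
        simp
      · rw [if_neg hcase]
        have h1 : ((pvIter nums n h0 t).2.map Prod.fst).drop (left - 1).toNat = [] :=
          List.drop_eq_nil_of_le (by omega)
        have h2 : List.drop ((left - 1).toNat - t) [s] = [] :=
          List.drop_eq_nil_of_le (by simp; omega)
        rw [h1, h2]
        simp

theorem pvChain_length (nums : List Int) (n : Int) :
    ∀ (k : Nat) (s i : Int), (n - i).toNat ≤ k → i < n →
      (pvChain nums n s i).length = (n - i).toNat := by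
  intro k
  induction k with
  | zero =>
    intro s i hk hi
    exact absurd hk (by omega)
  | succ k ih =>
    intro s i hk hi
    rw [pvChain_cons]
    by_cases hlt : i < n - 1
    · rw [if_pos hlt]
      simp only [List.length_cons]
      rw [ih _ _ (by omega) (by omega)]
      omega
    · rw [if_neg hlt]
      simp only [List.length_cons, List.length_nil]
      omega

theorem pvGauss (N : Nat) :
    2 * (((List.range N).map (fun k => N - k)).sum) = N * (N + 1) := by
  have h1 : ((List.range N).map (fun k => N - k)).sum = ∑ j ∈ Finset.range N, (N - j) := by
    rw [Finset.sum_range, Fin.sum_univ_def]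
    congr 1
    rw [← List.map_coe_finRange_eq_range (n := N), List.map_map]
    rfl
  have h2 : ∑ j ∈ Finset.range N, (N - j) = ∑ j ∈ Finset.range N, (j + 1) := by
    rw [← Finset.sum_range_reflect (fun j => j + 1) N]
    refine Finset.sum_congr rfl ?_
    intro j hj
    simp only [Finset.mem_range] at hj
    omega
  rw [h1, h2, Finset.sum_add_distrib, Finset.sum_const, Finset.card_range, smul_eq_mul]
  cases N with
  | zero => simp
  | succ m =>
    have h3 := Finset.sum_range_id_mul_two (m + 1)
    simp only [Nat.add_sub_cancel] at h3
    have e1 : (m + 1) * (m + 1 + 1) = (m + 1) * m + 2 * (m + 1) := by ring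
    omega

theorem pvH0 (nums : List Int) (n : Int) (hn : n = (nums.length : Int)) :
    nums.zipIdx.map (fun p => (p.1, (p.2 : Int))) =
      (PySem.List.pyRange 0 n).map (fun i => (PySem.List.pyGetD nums i 0, i)) := by
  apply List.ext_getElem
  · simp [PySem.List.length_pyRange_one, hn]
  · intro k h1 h2
    have hk : k < nums.length := by simpa using h1
    simp only [List.getElem_map, List.getElem_zipIdx, PySem.List.getElem_pyRange_one,
      zero_add]
    rw [PySem.List.pyGetD_natCast, List.getD_eq_getElem nums 0 hk]

theorem pvTotal (nums : List Int) (n : Int) (hn : n = (nums.length : Int)) :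
    2 * ((nums.zipIdx.map (fun p => (p.1, (p.2 : Int)))).flatMap (pvChainF nums n)).length
      = nums.length * (nums.length + 1) := by
  rw [pvH0 nums n hn, List.length_flatMap, List.map_map, hn,
    PySem.List.pyRange_zero_nat, List.map_map]
  simp only [Function.comp_def]
  have hcongr : ∀ k ∈ List.range nums.length,
      (pvChainF nums ((nums.length : Nat) : Int) (PySem.List.pyGetD nums (k : Int) 0, (k : Int))).length
        = nums.length - k := by
    intro k hk
    simp only [List.mem_range] at hk
    unfold pvChainF
    rw [pvChain_length nums ((nums.length : Nat) : Int) (((nums.length : Int) - k).toNat)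
      _ _ le_rfl (by omega)]
    omega
  rw [List.map_congr_left hcongr]
  exact pvGauss nums.length

theorem pvChainFold (nums : List Int) (n : Int) (hn : n = (nums.length : Int)) :
    ∀ (k : Nat) (a i : Int) (sums : List Int), (n - i).toNat ≤ k → 0 ≤ i → i < n →
      ((nums.drop i.toNat).foldl
        (fun (st : Int × List Int) x =>
          let acc := st.1 + x
          (acc, st.2 ++ [acc]))
        (a, sums)).2 = sums ++ (pvChain nums n (a + PySem.List.pyGetD nums i 0) i).map Prod.fst := by
  intro k
  induction k with
  | zero =>
    intro a i sums hk h0i hi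
    exact absurd hk (by omega)
  | succ k ih =>
    intro a i sums hk h0i hi
    have hilt : i.toNat < nums.length := by omega
    rw [List.drop_eq_getElem_cons hilt, List.foldl_cons]
    have hg : PySem.List.pyGetD nums i 0 = nums[i.toNat] :=
      PySem.List.pyGetD_eq_getElem nums 0 h0i (by omega)
    by_cases hlt : i < n - 1
    · have hdrop : nums.drop (i.toNat + 1) = nums.drop (i + 1).toNat := by
        congr 1
        omega
      rw [hdrop, ih (a + nums[i.toNat]) (i + 1) (sums ++ [a + nums[i.toNat]])
        (by omega) (by omega) (by omega)]
      conv_rhs => rw [pvChain_cons, if_pos hlt]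
      simp [hg]
    · have hdrop : nums.drop (i.toNat + 1) = [] :=
        List.drop_eq_nil_of_le (by omega)
      rw [hdrop]
      simp only [List.foldl_nil]
      conv_rhs => rw [pvChain_cons, if_neg hlt]
      simp [hg]

theorem pvRangeCast (right : Int) :
    PySem.List.pyRange 1 (right + 1) = PySem.List.pyRange 1 (((right.toNat : Nat) : Int) + 1) := by
  rw [PySem.List.pyRange_one, PySem.List.pyRange_one]
  congr 2
  omega

theorem pvEnumSum (left right : Int) :
    ∀ (L : List Int) (k0 a : Int),
      (PySem.List.enumerate L k0).foldl
        (fun acc p => if left ≤ p.1 ∧ p.1 ≤ right then acc + p.2 else acc) a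
      = a + ((L.take (right - k0 + 1).toNat).drop (left - k0).toNat).sum := by
  intro L
  induction L with
  | nil => intro k0 a; simp [PySem.List.enumerate]
  | cons x L ih =>
    intro k0 a
    rw [PySem.List.enumerate_cons, List.foldl_cons]
    by_cases hkr : k0 ≤ right
    · have htake : (right - k0 + 1).toNat = ((right - (k0 + 1) + 1).toNat) + 1 := by omega
      rw [htake, List.take_succ_cons]
      by_cases hkl : left ≤ k0
      · rw [if_pos ⟨hkl, hkr⟩, ih (k0 + 1) (a + x)]
        have hd : (left - k0).toNat = 0 := by omega
        have hd' : (left - (k0 + 1)).toNat = 0 := by omega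
        rw [hd, hd', List.drop_zero, List.drop_zero, List.sum_cons]
        ring
      · rw [if_neg (by tauto), ih (k0 + 1) a]
        have hd : (left - k0).toNat = ((left - (k0 + 1)).toNat) + 1 := by omega
        rw [hd, List.drop_succ_cons]
    · rw [if_neg (by tauto), ih (k0 + 1) a]
      have h1 : (right - k0 + 1).toNat = 0 := by omega
      have h2 : (right - (k0 + 1) + 1).toNat = 0 := by omega
      rw [h1, h2]
      simp

theorem pvTrivAcc (nums : List Int) (n left : Int) :
    ∀ (l : List Int) (hp : List (Int × Int)), (∀ k ∈ l, ¬ left ≤ k) →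
      (l.foldl (pvAStep nums n left) (hp, 0)).2 = 0 := by
  intro l
  induction l with
  | nil => intro hp _; rfl
  | cons k l ih =>
    intro hp hk
    rw [List.foldl_cons]
    have hstep : (pvAStep nums n left (hp, 0) k).2 = 0 := by
      unfold pvAStep
      cases hc : pvPopMin hp with
      | none => rfl
      | some p =>
        obtain ⟨⟨s, i⟩, h'⟩ := p
        simp only [if_neg (hk k List.mem_cons_self)]
    have hshape : pvAStep nums n left (hp, 0) k = ((pvAStep nums n left (hp, 0) k).1, 0) := by
      rw [Prod.ext_iff]
      exact ⟨rfl, hstep⟩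
    rw [hshape]
    exact ih _ (fun k' hk' => hk k' (List.mem_cons_of_mem _ hk'))

theorem pvTrivA (nums : List Int) (n left right : Int) (h : right < left ∨ right ≤ 0) :
    range_sum_sorted_sum nums n left right = PySem.Int.mod 0 1000000007 := by
  unfold range_sum_sorted_sum
  simp only
  rw [pvTrivAcc nums n left _ _ ?_]
  intro k hk
  have := PySem.List.mem_pyRange_one.mp hk
  rcases h with h | h <;> omega

theorem pvTrivBSum (left right : Int) (L : List Int) (h : right < left ∨ right ≤ 0) :
    (PySem.List.enumerate L 1).foldl
      (fun acc p => if left ≤ p.1 ∧ p.1 ≤ right then acc + p.2 else acc) 0 = 0 := by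
  rw [pvEnumSum left right L 1 0]
  have hnil : List.drop (left - 1).toNat (List.take (right - 1 + 1).toNat L) = [] := by
    apply List.drop_eq_nil_of_le
    rw [List.length_take]
    rcases h with h | h <;> omega
  rw [hnil]
  rfl

theorem pvTrivB (nums : List Int) (n left right : Int) (h : right < left ∨ right ≤ 0) :
    range_sum_sorted_sum_alt nums n left right = PySem.Int.mod 0 1000000007 := by
  unfold range_sum_sorted_sum_alt
  simp only
  rw [pvTrivBSum left right _ h]

theorem range_sum_sorted_sum_spec : Claim_equal_range_sum_sorted_sum := by
  intro nums n left right _hdom hpre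
  unfold Spec_range_sum_sorted_sum
  rcases hpre with htriv | ⟨_hnle, ⟨hn, hpos, hrb⟩ | ⟨hlt, _⟩⟩
  case inl => rw [pvTrivA _ _ _ _ (Or.inr htriv), pvTrivB _ _ _ _ (Or.inr htriv)]
  case inr.inr => rw [pvTrivA _ _ _ _ (Or.inl hlt), pvTrivB _ _ _ _ (Or.inl hlt)]
  rw [hn] at hrb
  have hh0 := pvH0 nums n hn
  have hwf : ∀ p ∈ nums.zipIdx.map (fun p => (p.1, (p.2 : Int))), 0 ≤ p.2 ∧ p.2 < n := by
    rw [hh0]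
    intro p hp
    obtain ⟨i, hi, rfl⟩ := List.mem_map.mp hp
    exact PySem.List.mem_pyRange_one.mp hi
  have htot := pvTotal nums n hn
  have hrtot : right.toNat ≤
      ((nums.zipIdx.map (fun p => (p.1, (p.2 : Int)))).flatMap (pvChainF nums n)).length := by
    have h2 : ((2 * ((nums.zipIdx.map (fun p => (p.1, (p.2 : Int)))).flatMap
        (pvChainF nums n)).length : Nat) : Int) = (nums.length : Int) * ((nums.length : Int) + 1) := by
      rw [htot]; push_cast; ring
    push_cast at h2
    have h1 : right ≤ (((nums.zipIdx.map (fun p => (p.1, (p.2 : Int)))).flatMap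
        (pvChainF nums n)).length : Int) := by linarith
    omega
  have hne : ∀ u < right.toNat,
      (pvIter nums n (nums.zipIdx.map (fun p => (p.1, (p.2 : Int)))) u).1 ≠ [] :=
    fun u hu => pvNE nums n _ hn hpos hwf u (by omega)
  have hfold := pvFoldIter nums n (nums.zipIdx.map (fun p => (p.1, (p.2 : Int)))) left
    right.toNat hne
  obtain ⟨_, _, hpair, _, _, _⟩ := pvInv_holds nums n
    (nums.zipIdx.map (fun p => (p.1, (p.2 : Int)))) hn hpos hwf
    ((nums.zipIdx.map (fun p => (p.1, (p.2 : Int)))).flatMap (pvChainF nums n)).length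
  have hfull := pvFullPerm nums n (nums.zipIdx.map (fun p => (p.1, (p.2 : Int)))) hn hpos hwf
  have htake := pvTake nums n (nums.zipIdx.map (fun p => (p.1, (p.2 : Int)))) hrtot hne
  have hmin : min n (nums.length : Int) = n := by omega
  have hsums : (PySem.List.pyRange 0 (min n (nums.length : Int))).foldl (fun sums i =>
      ((PySem.List.slice nums (some i) (some n)).foldl
        (fun (st : Int × List Int) x =>
          let acc := st.1 + x
          (acc, st.2 ++ [acc])) (0, sums)).2) ([] : List Int)
      = ((nums.zipIdx.map (fun p => (p.1, (p.2 : Int)))).flatMap (pvChainF nums n)).map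
          Prod.fst := by
    rw [hmin]
    rw [PySem.List.foldl_congr_mem (PySem.List.pyRange 0 n) _
      (fun sums i => sums ++ (pvChain nums n (PySem.List.pyGetD nums i 0) i).map Prod.fst)
      ([] : List Int) ?_]
    · rw [PySem.List.foldl_append_eq_flatMap]
      rw [hh0, List.map_flatMap, List.flatMap_map]
      simp [pvChainF]
    · intro acc x hx
      obtain ⟨hx0, hxn⟩ := PySem.List.mem_pyRange_one.mp hx
      have hslice : PySem.List.slice nums (some x) (some n) = nums.drop x.toNat := by
        rw [PySem.List.slice_toNat nums hx0 (by omega)]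
        exact List.take_of_length_le (by simp [List.length_drop]; omega)
      rw [hslice]
      have hcf := pvChainFold nums n hn ((n - x).toNat) 0 x acc le_rfl hx0 hxn
      rw [zero_add] at hcf
      exact hcf
  have hperm : ((pvIter nums n (nums.zipIdx.map (fun p => (p.1, (p.2 : Int))))
      ((nums.zipIdx.map (fun p => (p.1, (p.2 : Int)))).flatMap (pvChainF nums n)).length).2.map
        Prod.fst).Perm
      (((nums.zipIdx.map (fun p => (p.1, (p.2 : Int)))).flatMap (pvChainF nums n)).map
        Prod.fst) := hfull.map Prod.fst
  have hsorted := PySem.List.sorted_id_eq_of_perm_of_pairwise _ _ hperm hpair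
  unfold range_sum_sorted_sum range_sum_sorted_sum_alt
  simp only
  rw [pvRangeCast right, hfold, hsums, hsorted, pvEnumSum left right _ 1 0]
  congr 1
  rw [htake, List.map_take]
  have hr1 : (right - 1 + 1).toNat = right.toNat := by omega
  rw [hr1]
  simp
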